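-- pv_equiv track=rewrite | github.com/bonoboris/IA-werewolves-vs-vampires | werevamp/utils.py | min_argmin
-- ===== SOURCE A (Python) =====
-- from typing import Union, Tuple, Optional, Sequence, TypeVar, List, Callable, Iterable
--
-- T = TypeVar('T')
--
-- def min_argmin(seq: Sequence[T]) -> Tuple[T, List[int]]:
--     """Returns the min value of `seq` and the list of indices with min value."""
--     if len(seq) == 0:
--         raise ValueError("Empty sequence doen't have a minimum")
--     mval, midx = seq[0], [0]
--     for idx, val in enumerate(seq[1:]):
--         if val < mval:
--             mval = val
--             midx = [idx+1]
--         elif val == mval: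
--             midx.append(idx+1)
--     return mval, midx
-- ===== SOURCE B (Python) =====
-- def min_argmin(seq):
--     """Returns the min value of `seq` and the list of indices with min value."""
--     if len(seq) == 0:
--         raise ValueError("Empty sequence doen't have a minimum")
--     mval = min(seq)
--     return mval, [i for i, v in enumerate(seq) if v == mval]
-- ===== Notes on version B (the rewrite author's own statement) =====
-- stated objective: simpler
-- what changed: Replaces the single-pass running-min with reset/append index bookkeeping by two plain passes: min(seq), then one comprehension collecting the indices equal to it.
import Mathlib
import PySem

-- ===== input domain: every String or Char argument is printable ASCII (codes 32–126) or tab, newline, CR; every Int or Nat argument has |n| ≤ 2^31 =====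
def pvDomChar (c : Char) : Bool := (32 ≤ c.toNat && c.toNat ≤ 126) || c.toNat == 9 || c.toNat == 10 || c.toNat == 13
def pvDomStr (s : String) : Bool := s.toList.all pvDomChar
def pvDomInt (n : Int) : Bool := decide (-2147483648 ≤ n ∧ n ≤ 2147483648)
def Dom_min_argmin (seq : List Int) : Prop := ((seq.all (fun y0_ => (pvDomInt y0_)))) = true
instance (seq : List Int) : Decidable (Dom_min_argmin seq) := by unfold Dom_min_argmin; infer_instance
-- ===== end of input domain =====

-- B replaces A's one-pass reset/append bookkeeping by two plain passes: min, then collect equal indices.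
-- Python A raises ValueError on the empty list; Pre_ excludes it.
-- ===== PORT A =====
-- loop body of A's for-loop, named for readability
def min_argmin_step (st : Int × List Int) (p : Int × Int) : Int × List Int :=
  if p.2 < st.1 then (p.2, [p.1 + 1])
  else if p.2 = st.1 then (st.1, st.2 ++ [p.1 + 1])
  else st

def min_argmin (seq : List Int) : Int × List Int :=
  match seq with
  | [] => (0, [])   -- Python raises ValueError here; excluded by Pre_min_argmin
  | x :: _ =>
    (PySem.List.enumerate (PySem.List.slice seq (some 1) none)).foldl min_argmin_step (x, [0])

-- ===== PORT B =====
def min_argmin_alt (seq : List Int) : Int × List Int :=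
  match PySem.List.min? seq (fun y => y) with
  | none => (0, [])   -- Python's min raises ValueError here; excluded by Pre_min_argmin
  | some m => (m, ((PySem.List.enumerate seq).filter (fun p => p.2 == m)).map (·.1))

-- ===== PRECONDITION & SPEC =====
def Pre_min_argmin (seq : List Int) : Prop := seq ≠ []
instance (seq : List Int) : Decidable (Pre_min_argmin seq) := by unfold Pre_min_argmin; infer_instance
def pvWitness_min_argmin : List Int := [3, 1, 2, 1]
def Spec_min_argmin (seq : List Int) (out : Int × List Int) : Prop := out = min_argmin_alt seq
instance (seq : List Int) (out : Int × List Int) : Decidable (Spec_min_argmin seq out) := by unfold Spec_min_argmin; infer_instance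

-- ===== CLAIM (what is proved, stated in full; the proofs are below) =====
def Claim_equal_min_argmin : Prop := ∀ (seq : List Int), Dom_min_argmin seq → Pre_min_argmin seq → Spec_min_argmin seq (min_argmin seq)

-- ===== LEMMAS AND PROOFS =====

-- A's loop, characterised: the running min becomes foldl min; the index list is the old
-- accumulator (kept only if no strict improvement occurs) followed by the positions equal to the final min.
theorem min_argmin_loop (t : List Int) (s : Int) (m : Int) (idx : List Int) :
    (PySem.List.enumerate t s).foldl min_argmin_step (m, idx)
    = (t.foldl min m,
       (if t.foldl min m < m then [] else idx)
         ++ ((PySem.List.enumerate t s).filter (fun p => p.2 == t.foldl min m)).map (fun p => p.1 + 1)) := by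
  induction t generalizing s m idx with
  | nil => simp
  | cons v t' ih =>
    simp only [PySem.List.enumerate_cons, List.foldl_cons, List.filter_cons]
    by_cases h1 : v < m
    · have hmin : min m v = v := by omega
      simp only [hmin]
      have hM : t'.foldl min v ≤ v := (PySem.List.foldl_min_le t' v).1
      have hstep : min_argmin_step (m, idx) (s, v) = (v, [s + 1]) := by
        simp [min_argmin_step, h1]
      rw [hstep, ih]
      have hlt : t'.foldl min v < m := by omega
      rw [if_pos hlt]
      by_cases h2 : t'.foldl min v < v
      · have hne : ¬ ((v : Int) = t'.foldl min v) := by omega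
        simp [hne, h2]
      · have heq : (v : Int) = t'.foldl min v := by omega
        simp [← heq]
    · have hmin : min m v = m := by omega
      simp only [hmin]
      have hM : t'.foldl min m ≤ m := (PySem.List.foldl_min_le t' m).1
      by_cases h2 : v = m
      · have hstep : min_argmin_step (m, idx) (s, v) = (m, idx ++ [s + 1]) := by
          simp [min_argmin_step, h2]
        rw [hstep, ih]
        by_cases hc : t'.foldl min m < m
        · have hne : ¬ ((v : Int) = t'.foldl min m) := by omega
          simp [hne, hc]
        · have heq : t'.foldl min m = m := by omega
          simp [heq, h2]
      · have hstep : min_argmin_step (m, idx) (s, v) = (m, idx) := by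
          simp [min_argmin_step, h2]
          omega
        rw [hstep, ih]
        have hne : ¬ ((v : Int) = t'.foldl min m) := by omega
        simp [hne]

theorem enumerate_shift_one (t : List Int) (s : Int) :
    PySem.List.enumerate t (s + 1) = (PySem.List.enumerate t s).map (fun p => (p.1 + 1, p.2)) := by
  induction t generalizing s with
  | nil => simp
  | cons v t' ih =>
    rw [PySem.List.enumerate_cons, PySem.List.enumerate_cons, List.map_cons, ← ih]

theorem min_argmin_agree (x : Int) (t : List Int) :
    min_argmin (x :: t) = min_argmin_alt (x :: t) := by
  have hle : t.foldl min x ≤ x := (PySem.List.foldl_min_le t x).1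
  have hsh : ∀ m : Int,
      ((PySem.List.enumerate t 1).filter (fun p => p.2 == m)).map (fun p => p.1)
      = ((PySem.List.enumerate t 0).filter (fun p => p.2 == m)).map (fun p => p.1 + 1) := by
    intro m
    have h01 : (1 : Int) = 0 + 1 := by ring
    rw [h01, enumerate_shift_one, List.filter_map, List.map_map]
    rfl
  simp only [min_argmin, min_argmin_alt, PySem.List.min?_id_cons, PySem.List.slice_from_one,
    List.tail_cons, min_argmin_loop, PySem.List.enumerate_cons, List.filter_cons]
  by_cases hc : t.foldl min x < x
  · have hne : ¬ ((x : Int) = t.foldl min x) := by omega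
    simp only [if_pos hc, List.nil_append]
    simp [hne]
    exact (hsh _).symm
  · have heq : (x : Int) = t.foldl min x := by omega
    simp only [if_neg hc]
    simp [← heq]
    exact (hsh _).symm

-- ===== VERDICT (by name: the statement is the Claim_ definition above) =====
theorem min_argmin_spec : Claim_equal_min_argmin := by
  intro seq _ hpre
  unfold Spec_min_argmin
  match seq with
  | [] => exact absurd rfl hpre
  | x :: t => exact min_argmin_agree x t
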